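-- pv_equiv track=rewrite | github.com/Maxkile/techno | src/ReverseListPrint.py | getLineLen
-- ===== SOURCE A (Python) =====
-- def getLineLen(v,cols):
--     line_len_lst = list()
--     line_len = 0
--     for i in range(0,len(v)):
--         line_len += 1
--         if ((line_len == cols) or (i == len(v)-1)):
--             line_len_lst.append(line_len)
--             line_len = 0
--     return tuple(line_len_lst)
-- ===== SOURCE B (Python) =====
-- def getLineLen(v, cols):
--     n = len(v)
--     if n == 0:
--         return ()
--     if cols <= 0:
--         return (n,)
--     q, r = divmod(n, cols)
--     return tuple([cols] * q + ([r] if r else []))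
-- ===== Notes on version B (the rewrite author's own statement) =====
-- stated objective: faster
-- what changed: Replaces the element-by-element counting loop with closed-form arithmetic: divmod(len(v), cols) gives the number of full chunks and the remainder (cols<=0 handled as a single chunk).
import Mathlib
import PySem

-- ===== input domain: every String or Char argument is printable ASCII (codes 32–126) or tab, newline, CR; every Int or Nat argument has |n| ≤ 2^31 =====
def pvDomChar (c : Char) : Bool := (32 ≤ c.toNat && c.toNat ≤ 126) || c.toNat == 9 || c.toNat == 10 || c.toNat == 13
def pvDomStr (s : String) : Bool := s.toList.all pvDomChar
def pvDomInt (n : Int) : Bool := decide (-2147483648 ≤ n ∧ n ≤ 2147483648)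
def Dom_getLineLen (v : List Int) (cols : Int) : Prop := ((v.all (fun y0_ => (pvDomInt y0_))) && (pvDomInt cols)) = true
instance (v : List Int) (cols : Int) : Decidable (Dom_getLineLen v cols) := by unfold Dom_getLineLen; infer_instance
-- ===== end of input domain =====

-- B replaces A's per-element counting loop by closed-form divmod arithmetic (faster: output-size work instead of O(n)).


-- ===== PORT A =====
-- loop body of A: state = (line_len_lst, line_len)
def aStep (n cols : Int) (st : List Int × Int) (i : Int) : List Int × Int :=
  let ll := st.2 + 1
  if ll = cols ∨ i = n - 1 then (st.1 ++ [ll], 0) else (st.1, ll)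

def getLineLen (v : List Int) (cols : Int) : List Int :=
  ((PySem.List.pyRange 0 (v.length : Int) 1).foldl (aStep (v.length : Int) cols) ([], 0)).1

-- ===== PORT B =====
def getLineLen_alt (v : List Int) (cols : Int) : List Int :=
  let n : Int := (v.length : Int)
  if n = 0 then []
  else if cols ≤ 0 then [n]
  else
    let q := PySem.Int.floordiv n cols
    let r := PySem.Int.mod n cols
    List.replicate q.toNat cols ++ (if r ≠ 0 then [r] else [])

-- ===== PRECONDITION & SPEC =====
def Spec_getLineLen (v : List Int) (cols : Int) (out : List Int) : Prop := out = getLineLen_alt v cols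
instance (v : List Int) (cols : Int) (out : List Int) : Decidable (Spec_getLineLen v cols out) := by unfold Spec_getLineLen; infer_instance

-- ===== CLAIM (what is proved, stated in full; the proofs are below) =====
def Claim_equal_getLineLen : Prop := ∀ (v : List Int) (cols : Int), Dom_getLineLen v cols → Spec_getLineLen v cols (getLineLen v cols)

-- ===== LEMMAS AND PROOFS =====

-- uniqueness of Euclidean quotient/remainder for a positive divisor
theorem pvDivMod (a cols q r : Int) (hc : 0 < cols) (h0 : 0 ≤ r) (hlt : r < cols)
    (heq : r + cols * q = a) : a / cols = q ∧ a % cols = r :=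
  (Int.ediv_emod_unique'' (by omega)).mpr ⟨heq, h0, by rwa [abs_of_pos hc]⟩

-- invariant for cols ≤ 0: nothing is appended before the last index, line_len just counts
theorem pvInvNonpos (n cols : Int) (hc : cols ≤ 0) :
    ∀ (k : Int), 0 ≤ k → k ≤ n - 1 →
      (PySem.List.pyRange 0 k 1).foldl (aStep n cols) ([], 0) = ([], k) := by
  intro k hk0
  induction k, hk0 using Int.le_induction with
  | base =>
    intro _
    simp [PySem.List.pyRange_one_eq_nil le_rfl]
  | succ k hk ih =>
    intro hkn
    rw [PySem.List.pyRange_one_succ_right hk, List.foldl_append, ih (by omega)]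
    simp only [List.foldl_cons, List.foldl_nil, aStep]
    have h1 : ¬ (k + 1 = cols ∨ k = n - 1) := by omega
    simp [h1]

-- invariant for cols ≥ 1, before the last index: acc = full chunks, line_len = k % cols
theorem pvInvPos (n cols : Int) (hc : 1 ≤ cols) :
    ∀ (k : Int), 0 ≤ k → k ≤ n - 1 →
      (PySem.List.pyRange 0 k 1).foldl (aStep n cols) ([], 0)
        = (List.replicate (k / cols).toNat cols, k % cols) := by
  intro k hk0
  induction k, hk0 using Int.le_induction with
  | base =>
    intro _
    simp [PySem.List.pyRange_one_eq_nil le_rfl]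
  | succ k hk ih =>
    intro hkn
    rw [PySem.List.pyRange_one_succ_right hk, List.foldl_append, ih (by omega)]
    simp only [List.foldl_cons, List.foldl_nil, aStep]
    have hknn : k ≠ n - 1 := by omega
    have hdm := Int.mul_ediv_add_emod k cols
    by_cases hfull : k % cols + 1 = cols
    · have h1 : (k % cols + 1 = cols ∨ k = n - 1) := Or.inl hfull
      rw [if_pos h1, hfull]
      have hp := pvDivMod (k + 1) cols (k / cols + 1) 0 (by omega) le_rfl (by omega)
        (by rw [mul_add, mul_one]; linarith [hdm])
      have hq0 : 0 ≤ k / cols := Int.ediv_nonneg hk (by omega)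
      have e1 : ((k + 1) / cols).toNat = (k / cols).toNat + 1 := by
        rw [hp.1]; omega
      rw [e1, List.replicate_succ', hp.2]
    · have h1 : ¬ (k % cols + 1 = cols ∨ k = n - 1) := by
        refine not_or.mpr ?_; exact ⟨hfull, hknn⟩
      rw [if_neg h1]
      have hm0 : 0 ≤ k % cols := Int.emod_nonneg k (by omega)
      have hmlt : k % cols < cols := Int.emod_lt_of_pos k (by omega)
      have hp := pvDivMod (k + 1) cols (k / cols) (k % cols + 1) (by omega) (by omega)
        (by omega) (by linarith [hdm])
      rw [hp.1, hp.2]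

-- ===== VERDICT (by name: the statement is the Claim_ definition above) =====
theorem getLineLen_spec : Claim_equal_getLineLen := by
  unfold Claim_equal_getLineLen
  intro v cols _
  unfold Spec_getLineLen getLineLen getLineLen_alt
  set n : Int := (v.length : Int) with hn
  have hn0 : 0 ≤ n := by positivity
  by_cases hz : n = 0
  · simp [hz, PySem.List.pyRange_one_eq_nil le_rfl]
  · have hpos : 1 ≤ n := by omega
    -- split off the last loop iteration
    rw [PySem.List.pyRange_one_append 0 (n - 1) n (by omega) (by omega)]
    have hsingle : PySem.List.pyRange (n - 1) n 1 = [n - 1] := by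
      have := PySem.List.pyRange_one_singleton (n - 1)
      simpa [show n - 1 + 1 = n by ring] using this
    rw [List.foldl_append, hsingle]
    by_cases hc : cols ≤ 0
    · rw [pvInvNonpos n cols hc (n - 1) (by omega) le_rfl]
      simp only [List.foldl_cons, List.foldl_nil, aStep]
      simp [hz, hc]
    · simp only [not_le] at hc
      have hdm := Int.mul_ediv_add_emod n cols
      have hm0 : 0 ≤ n % cols := Int.emod_nonneg n (by omega)
      have hmlt : n % cols < cols := Int.emod_lt_of_pos n (by omega)
      rw [pvInvPos n cols (by omega) (n - 1) (by omega) le_rfl]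
      simp only [List.foldl_cons, List.foldl_nil, aStep]
      rw [PySem.Int.floordiv_eq_ediv_of_pos (by omega), PySem.Int.mod_eq_emod_of_pos (by omega)]
      rw [if_neg hz, if_neg (show ¬ cols ≤ 0 by omega)]
      by_cases hr : n % cols = 0
      · have hcn : cols ≤ n := by
          by_contra hlt
          have := Int.emod_eq_of_lt (by omega : (0:Int) ≤ n) (by omega : n < cols)
          omega
        have hq1 : 1 ≤ n / cols := by
          have := (Int.le_ediv_iff_mul_le (show (0:Int) < cols by omega)).mpr
            (show 1 * cols ≤ n by omega)
          exact this
        have hp := pvDivMod (n - 1) cols (n / cols - 1) (cols - 1) (by omega) (by omega)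
          (by omega) (by rw [mul_sub, mul_one]; linarith [hdm])
        rw [if_pos (show (n - 1) % cols + 1 = cols ∨ True from Or.inr trivial)]
        have e1 : ((n - 1) / cols).toNat + 1 = (n / cols).toNat := by rw [hp.1]; omega
        simp only [hp.2, hr]
        have hstep : (cols - 1) + 1 = cols := by ring
        simp [hstep, ← e1, List.replicate_succ']
      · have hp := pvDivMod (n - 1) cols (n / cols) (n % cols - 1) (by omega) (by omega)
          (by omega) (by linarith [hdm])
        rw [if_pos (show (n - 1) % cols + 1 = cols ∨ True from Or.inr trivial)]
        simp only [hp.1, hp.2]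
        have hstep : n % cols - 1 + 1 = n % cols := by ring
        simp [hstep, hr]
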